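-- pv_equiv track=rewrite | github.com/the-nexus/AdventOfCode | 2017/day09/day09_2.py | processGarbage
-- ===== SOURCE A (Python) =====
-- def processGarbage(stream, start_idx):
--     current_idx = start_idx
--     total_garbage = 0
--     ignore_character = False
--     while current_idx < len(stream) - 1:
--         current_idx = current_idx + 1
--         character = stream[current_idx]
--
--         if ignore_character:
--             ignore_character = False
--             continue
--
--         if character == "!":
--             ignore_character = True
--             continue
--         elif character == ">":
--             break
--
--         total_garbage = total_garbage + 1
--
--     return total_garbage, current_idx
-- ===== SOURCE B (Python) =====
-- def processGarbage(stream, start_idx):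
--     n = len(stream)
--     seq = [stream[i] for i in range(start_idx + 1, n)]
--     if not seq:
--         return 0, start_idx
--     # stage 1: strip escape pairs, keeping the surviving characters with their index
--     pairs = []
--     k = 0
--     while k < len(seq):
--         if seq[k] == "!":
--             k += 2
--         else:
--             pairs.append((seq[k], start_idx + 1 + k))
--             k += 1
--     # stage 2: count survivors before the first '>'
--     count = 0
--     for c, pos in pairs:
--         if c == ">":
--             return count, pos
--         count += 1
--     return count, n - 1
-- ===== Notes on version B (the rewrite author's own statement) =====
-- stated objective: alternative
-- what changed: Replaced A's single stateful loop (index + counter + ignore flag threaded across iterations) by a staged pipeline: materialize the slice of characters read, then a first pass that strips escape pairs into a list of surviving (char, position) pairs, then a second pass that counts survivors before the first '>'.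
import Mathlib
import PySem

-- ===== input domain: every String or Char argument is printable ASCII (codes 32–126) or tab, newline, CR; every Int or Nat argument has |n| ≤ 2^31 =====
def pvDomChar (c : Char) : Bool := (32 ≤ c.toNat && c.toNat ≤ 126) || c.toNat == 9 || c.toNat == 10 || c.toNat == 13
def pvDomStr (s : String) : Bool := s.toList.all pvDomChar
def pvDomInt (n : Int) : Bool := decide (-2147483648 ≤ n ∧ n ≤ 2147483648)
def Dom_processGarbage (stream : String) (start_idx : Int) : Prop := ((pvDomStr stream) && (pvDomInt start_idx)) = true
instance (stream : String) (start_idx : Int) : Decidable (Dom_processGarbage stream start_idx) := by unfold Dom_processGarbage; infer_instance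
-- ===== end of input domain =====

-- B replaces A's stateful flag-carrying loop by a staged pipeline (read slice, strip escape
-- pairs into survivors, count survivors before the first '>'); same cost, different structure.

-- ===== PORT A =====
-- while current_idx < len-1: current_idx += 1; character = stream[current_idx]; flag/continue logic.
-- fuel bounds the iteration count ((len-1-start_idx) iterations at most); when fuel runs out the
-- loop condition is false anyway, so the 0-fuel branch returns the same (total, idx) the loop would.
def pgLoopA (s : List Char) (fuel : Nat) (i g : Int) (ign : Bool) : Int × Int :=
  match fuel with
  | 0 => (g, i)
  | Nat.succ f =>
    if i < (s.length : Int) - 1 then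
      match PySem.List.pyGet? s (i + 1) with
      | none => (g, i + 1)          -- IndexError in Python; excluded by Pre_
      | some c =>
        if ign then pgLoopA s f (i + 1) g false
        else if c = '!' then pgLoopA s f (i + 1) g true
        else if c = '>' then (g, i + 1)
        else pgLoopA s f (i + 1) (g + 1) ign
    else (g, i)

def processGarbage (stream : String) (start_idx : Int) : Int × Int :=
  pgLoopA stream.toList (((stream.toList.length : Int) - 1 - start_idx).toNat) start_idx 0 false

-- ===== PORT B =====
-- seq = [stream[i] for i in range(start_idx+1, n)]; the getD default is unreachable under Pre_
-- (an out-of-range read is the IndexError Pre_ excludes).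
def pgSeq (s : List Char) (j : Int) : List Char :=
  (PySem.List.pyRange j (s.length : Int) 1).map (fun t => (PySem.List.pyGet? s t).getD ' ')

-- stage 1: the while-k loop over seq, as structural recursion over the same suffix; j is the
-- absolute index start_idx+1+k of the head.
def pgStrip (cs : List Char) (j : Int) : List (Char × Int) :=
  match cs with
  | [] => []
  | c :: rest =>
    if c = '!' then pgStrip rest.tail (j + 2)
    else (c, j) :: pgStrip rest (j + 1)
termination_by cs.length
decreasing_by
  all_goals simp [List.length_tail]

-- stage 2: the for loop over pairs with the running count.
def pgScan (pairs : List (Char × Int)) (count : Int) (n : Int) : Int × Int :=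
  match pairs with
  | [] => (count, n - 1)
  | (c, pos) :: rest => if c = '>' then (count, pos) else pgScan rest (count + 1) n

def processGarbage_alt (stream : String) (start_idx : Int) : Int × Int :=
  let s := stream.toList
  let seq := pgSeq s (start_idx + 1)
  if seq = [] then (0, start_idx)
  else pgScan (pgStrip seq (start_idx + 1)) 0 (s.length : Int)

-- ===== PRECONDITION & SPEC =====
-- Pre_ excludes exactly the inputs where A raises IndexError: the first read index start_idx+1
-- is below -len(stream); B raises there too (its comprehension reads the same indices).
def Pre_processGarbage (stream : String) (start_idx : Int) : Prop :=
  -((stream.toList.length : Int)) - 1 ≤ start_idx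
instance (stream : String) (start_idx : Int) : Decidable (Pre_processGarbage stream start_idx) := by unfold Pre_processGarbage; infer_instance
def pvWitness_processGarbage : String × Int := ("<ab!>c>", -1)

def Spec_processGarbage (stream : String) (start_idx : Int) (out : Int × Int) : Prop := out = processGarbage_alt stream start_idx
instance (stream : String) (start_idx : Int) (out : Int × Int) : Decidable (Spec_processGarbage stream start_idx out) := by unfold Spec_processGarbage; infer_instance

-- ===== CLAIM (what is proved, stated in full; the proofs are below) =====
def Claim_equal_processGarbage : Prop := ∀ (stream : String) (start_idx : Int), Dom_processGarbage stream start_idx → Pre_processGarbage stream start_idx → Spec_processGarbage stream start_idx (processGarbage stream start_idx)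

-- ===== LEMMAS AND PROOFS =====

theorem pgStrip_nil (j : Int) : pgStrip [] j = [] := by
  rw [pgStrip.eq_def]

theorem pgStrip_cons (c : Char) (rest : List Char) (j : Int) :
    pgStrip (c :: rest) j =
      if c = '!' then pgStrip rest.tail (j + 2) else (c, j) :: pgStrip rest (j + 1) := by
  rw [pgStrip.eq_def]

theorem pgLoopA_stop (s : List Char) (f : Nat) (i g : Int) (b : Bool)
    (h : (s.length : Int) - 1 ≤ i) : pgLoopA s f i g b = (g, i) := by
  cases f with
  | zero => rfl
  | succ f => rw [pgLoopA, if_neg (by omega : ¬ (i < (s.length : Int) - 1))]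

theorem pgSeq_nil (s : List Char) (j : Int) (h : (s.length : Int) ≤ j) : pgSeq s j = [] := by
  unfold pgSeq
  rw [PySem.List.pyRange_one_eq_nil h]
  rfl

theorem pgSeq_cons (s : List Char) (j : Int) (h : j < (s.length : Int)) :
    pgSeq s j = ((PySem.List.pyGet? s j).getD ' ') :: pgSeq s (j + 1) := by
  unfold pgSeq
  rw [PySem.List.pyRange_one_cons h]
  rfl

theorem pg_get_some (s : List Char) (j : Int) (h1 : -((s.length : Int)) ≤ j)
    (h2 : j < (s.length : Int)) : ∃ c, PySem.List.pyGet? s j = some c := by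
  have hne : PySem.List.pyGet? s j ≠ none := by
    intro hn
    rw [PySem.List.pyGet?_eq_none_iff] at hn
    exact hn ⟨h1, h2⟩
  exact Option.ne_none_iff_exists'.mp hne

theorem pg_main (fA : Nat) : ∀ (s : List Char) (i g : Int),
    (s.length : Int) - 1 - i ≤ (fA : Int) →
    -((s.length : Int)) - 1 ≤ i → i ≤ (s.length : Int) - 1 →
    pgLoopA s fA i g false = pgScan (pgStrip (pgSeq s (i + 1)) (i + 1)) g (s.length : Int) := by
  induction fA using Nat.strong_induction_on with
  | _ fA ih =>
    intro s i g hA hlo hhi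
    by_cases hc : i < (s.length : Int) - 1
    · match fA, hA with
      | 0, hA => omega
      | Nat.succ f, hA =>
        obtain ⟨c, hcget⟩ := pg_get_some s (i + 1) (by omega) (by omega)
        rw [pgLoopA, if_pos hc, hcget,
          pgSeq_cons s (i + 1) (by omega), hcget, pgStrip_cons]
        simp only [Option.getD_some, Bool.false_eq_true, if_false]
        by_cases h1 : c = '!'
        · rw [if_pos h1, if_pos h1]
          by_cases h3 : i + 1 < (s.length : Int) - 1
          · match f, hA with
            | 0, hA => omega
            | Nat.succ f', hA =>
              obtain ⟨c2, hc2⟩ := pg_get_some s (i + 2) (by omega) (by omega)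
              have hrest : pgSeq s (i + 1 + 1) = c2 :: pgSeq s (i + 2 + 1) := by
                rw [pgSeq_cons s (i + 1 + 1) (by omega)]
                rw [show i + 1 + 1 = i + 2 by ring, hc2]
                rfl
              rw [hrest]
              have hrec := ih f' (by omega) s (i + 2) g (by omega) (by omega) (by omega)
              rw [pgLoopA, if_pos h3]
              rw [show i + 1 + 1 = i + 2 by ring, hc2]
              simpa [show i + 1 + 2 = i + 2 + 1 by ring] using hrec
          · have hrest : pgSeq s (i + 1 + 1) = [] := pgSeq_nil s (i + 1 + 1) (by omega)
            rw [hrest, pgLoopA_stop s f (i + 1) g true (by omega)]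
            show _ = pgScan (pgStrip [] (i + 1 + 2)) g _
            rw [pgStrip_nil, pgScan]
            have h4 : i + 1 = (s.length : Int) - 1 := by omega
            rw [h4]
        · rw [if_neg h1, if_neg h1, pgScan]
          by_cases h2 : c = '>'
          · simp [h2]
          · rw [if_neg h2, if_neg h2]
            exact ih f (by omega) s (i + 1) (g + 1) (by omega) (by omega) (by omega)
    · rw [pgLoopA_stop s fA i g false (by omega),
        pgSeq_nil s (i + 1) (by omega), pgStrip_nil, pgScan]
      have h4 : i = (s.length : Int) - 1 := by omega
      rw [h4]

-- ===== VERDICT (by name: the statement is the Claim_ definition above) =====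
theorem processGarbage_spec : Claim_equal_processGarbage := by
  intro stream start_idx _ hpre
  unfold Spec_processGarbage processGarbage processGarbage_alt
  set s := stream.toList with hs
  dsimp only
  by_cases h : (s.length : Int) - 1 ≤ start_idx
  · have hseq : pgSeq s (start_idx + 1) = [] := pgSeq_nil s (start_idx + 1) (by omega)
    rw [hseq]; simp only [if_pos]
    exact pgLoopA_stop _ _ _ _ _ h
  · have hcons := pgSeq_cons s (start_idx + 1) (by omega)
    have hne : pgSeq s (start_idx + 1) ≠ [] := by rw [hcons]; simp
    simp only [if_neg hne]
    exact pg_main _ s start_idx 0 (by omega) hpre (by omega)
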